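-- pv_equiv track=rewrite | github.com/terminus78/BattleTracker | entry/stack_question.py | points_to_offsets
-- ===== SOURCE A (Python) =====
-- def points_to_offsets(points):
--     pos = [0,0]
--     offsets = []
--     for point in points:
--         dist = [point[0]-pos[0], point[1]-pos[1]]
--         offsets.append(dist)
--         pos = point
--     return offsets
-- ===== SOURCE B (Python) =====
-- def points_to_offsets(points):
--     xs = [p[0] for p in points]
--     ys = [p[1] for p in points]
--     n = len(xs)
--     dxs = [xs[i] - (xs[i - 1] if i > 0 else 0) for i in range(n)]
--     dys = [ys[i] - (ys[i - 1] if i > 0 else 0) for i in range(n)]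
--     return [[dx, dy] for dx, dy in zip(dxs, dys)]
-- ===== Notes on version B (the rewrite author's own statement) =====
-- stated objective: alternative
-- what changed: Instead of one loop over the points carrying a mutable running position and appending pairs, B transposes the input into two coordinate columns, computes each column's successive differences by random-access indexing over range(n), and zips the two difference columns back into pairs.
import Mathlib
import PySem

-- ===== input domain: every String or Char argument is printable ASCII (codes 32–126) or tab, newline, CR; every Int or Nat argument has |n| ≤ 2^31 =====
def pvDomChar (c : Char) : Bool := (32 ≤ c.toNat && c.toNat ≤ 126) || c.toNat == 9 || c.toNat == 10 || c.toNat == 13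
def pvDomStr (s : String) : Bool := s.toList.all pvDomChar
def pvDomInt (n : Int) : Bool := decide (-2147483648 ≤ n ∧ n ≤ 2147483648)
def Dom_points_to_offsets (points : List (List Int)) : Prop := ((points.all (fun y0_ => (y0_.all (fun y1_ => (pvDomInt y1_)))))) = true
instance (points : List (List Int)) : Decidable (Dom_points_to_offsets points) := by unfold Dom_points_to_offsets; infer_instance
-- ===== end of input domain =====

-- B replaces A's single stateful loop (running `pos`) by a staged, column-wise computation:
-- transpose into coordinate columns, index-based successive differences per column, re-zip;
-- objective: alternative decomposition, same cost.


-- ===== PORT A =====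
-- literal port of A: fold over points carrying (pos, offsets); point[i] via pyGet?
-- (defaulted with getD 0; Pre_ excludes the inputs where Python raises IndexError)
def points_to_offsets (points : List (List Int)) : List (List Int) :=
  (points.foldl
    (fun (st : List Int × List (List Int)) point =>
      let dist : List Int :=
        [(PySem.List.pyGet? point 0).getD 0 - (PySem.List.pyGet? st.1 0).getD 0,
         (PySem.List.pyGet? point 1).getD 0 - (PySem.List.pyGet? st.1 1).getD 0]
      (point, st.2 ++ [dist]))
    (([0, 0] : List Int), ([] : List (List Int)))).2

-- ===== PORT B =====
-- literal port of B: coordinate columns, indexed successive differences over range(n), re-zip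
def points_to_offsets_alt (points : List (List Int)) : List (List Int) :=
  let xs := points.map (fun p => (PySem.List.pyGet? p 0).getD 0)
  let ys := points.map (fun p => (PySem.List.pyGet? p 1).getD 0)
  let n : Int := xs.length
  let dxs := (PySem.List.pyRange 0 n 1).map
    (fun i => (PySem.List.pyGet? xs i).getD 0 -
      (if 0 < i then (PySem.List.pyGet? xs (i - 1)).getD 0 else 0))
  let dys := (PySem.List.pyRange 0 n 1).map
    (fun i => (PySem.List.pyGet? ys i).getD 0 -
      (if 0 < i then (PySem.List.pyGet? ys (i - 1)).getD 0 else 0))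
  (List.zip dxs dys).map (fun pr => [pr.1, pr.2])

-- ===== PRECONDITION & SPEC =====
-- Pre_ excludes inputs containing a point of length < 2, on which Python A raises IndexError.
def Pre_points_to_offsets (points : List (List Int)) : Prop :=
  ∀ p ∈ points, 2 ≤ p.length
instance (points : List (List Int)) : Decidable (Pre_points_to_offsets points) := by
  unfold Pre_points_to_offsets; infer_instance

def pvWitness_points_to_offsets : List (List Int) := [[1, 2], [3, 5]]

def Spec_points_to_offsets (points : List (List Int)) (out : List (List Int)) : Prop := out = points_to_offsets_alt points
instance (points : List (List Int)) (out : List (List Int)) : Decidable (Spec_points_to_offsets points out) := by unfold Spec_points_to_offsets; infer_instance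

-- ===== CLAIM (what is proved, stated in full; the proofs are below) =====
def Claim_equal_points_to_offsets : Prop := ∀ (points : List (List Int)), Dom_points_to_offsets points → Pre_points_to_offsets points → Spec_points_to_offsets points (points_to_offsets points)

-- ===== LEMMAS AND PROOFS =====

-- first coordinates (with default 0), used only inside the proofs
def pvG (k : Int) (p : List Int) : Int := (PySem.List.pyGet? p k).getD 0

-- loop invariant for A: the fold from state (pos, acc) yields acc ++ the pairwise differences
theorem pto_fold_eq (points : List (List Int)) :
    ∀ (pos : List Int) (acc : List (List Int)),
      (points.foldl
        (fun (st : List Int × List (List Int)) point =>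
          let dist : List Int :=
            [(PySem.List.pyGet? point 0).getD 0 - (PySem.List.pyGet? st.1 0).getD 0,
             (PySem.List.pyGet? point 1).getD 0 - (PySem.List.pyGet? st.1 1).getD 0]
          (point, st.2 ++ [dist]))
        (pos, acc)).2
      = acc ++ (List.zip (pos :: points) points).map
          (fun pr => [pvG 0 pr.2 - pvG 0 pr.1, pvG 1 pr.2 - pvG 1 pr.1]) := by
  induction points with
  | nil => intro pos acc; simp
  | cons p ps ih =>
      intro pos acc
      simp only [List.foldl_cons, List.zip_cons_cons, List.map_cons]
      rw [ih]
      simp [pvG, List.append_assoc]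

-- B's staged column computation also yields the pairwise differences
theorem alt_eq (points : List (List Int)) :
    points_to_offsets_alt points
    = (List.zip (([0, 0] : List Int) :: points) points).map
        (fun pr => [pvG 0 pr.2 - pvG 0 pr.1, pvG 1 pr.2 - pvG 1 pr.1]) := by
  unfold points_to_offsets_alt
  simp only [PySem.List.pyRange_one, Int.sub_zero, List.map_map]
  apply List.ext_getElem
  · simp
  · intro i h1 h2
    simp only [List.getElem_map, List.getElem_zip, List.getElem_range, Function.comp]
    have hi : i < points.length := by simpa using h2
    simp only [zero_add]
    cases i with
    | zero =>
        simp [pvG, List.getElem?_eq_getElem, hi]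
    | succ j =>
        have hj : j < points.length := Nat.lt_of_succ_lt hi
        have hc : ((j + 1 : ℕ) : ℤ) - 1 = ((j : ℕ) : ℤ) := by push_cast; ring
        simp only [hc, PySem.List.pyGet?_natCast, pvG,
          List.getElem?_eq_getElem hi, List.getElem?_eq_getElem hj,
          List.getElem_cons_succ, Option.map_some, Option.getD_some]
        have hpos : (0:ℤ) < ((j+1 : ℕ) : ℤ) := by positivity
        simp [hpos, List.getElem?_eq_getElem hi, List.getElem?_eq_getElem hj]

-- ===== VERDICT (by name: the statement is the Claim_ definition above) =====
theorem points_to_offsets_spec : Claim_equal_points_to_offsets := by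
  intro points _ _
  unfold Spec_points_to_offsets points_to_offsets
  rw [pto_fold_eq points [0, 0] [], alt_eq]
  simp
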